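-- pv_equiv track=rewrite | github.com/JaMunioz/GPS-domino | game/begin_logic.py | determinar_jugador_inicial
-- ===== SOURCE A (Python) =====
-- def determinar_jugador_inicial(jugadores_fichas):
--     chancho_mas_alto = -1
--     jugador_chancho_mayor = None
--
--     for jugador, fichas in jugadores_fichas.items():
--         for ficha in fichas:
--             if ficha[0] == ficha[1] and ficha[0] > chancho_mas_alto:
--                 chancho_mas_alto = ficha[0]
--                 jugador_chancho_mayor = jugador
--
--     if jugador_chancho_mayor is None:
--         for jugador, fichas in jugadores_fichas.items():
--             for ficha in fichas:
--                 if sum(ficha) > chancho_mas_alto: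
--                     chancho_mas_alto = sum(ficha)
--                     jugador_chancho_mayor = jugador
--     return jugador_chancho_mayor
-- ===== SOURCE B (Python) =====
-- def determinar_jugador_inicial(jugadores_fichas):
--     best_double = -1
--     best_double_player = None
--     best_sum = -1
--     best_sum_player = None
--     for jugador, fichas in jugadores_fichas.items():
--         for ficha in fichas:
--             if ficha[0] == ficha[1] and ficha[0] > best_double:
--                 best_double = ficha[0]
--                 best_double_player = jugador
--             s = ficha[0] + ficha[1]
--             if s > best_sum:
--                 best_sum = s
--                 best_sum_player = jugador
--     return best_double_player if best_double_player is not None else best_sum_player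
-- ===== Notes on version B (the rewrite author's own statement) =====
-- stated objective: alternative
-- what changed: Replaces A's two sequential conditional scans of all (player, tile) pairs with a single pass that maintains two accumulators (best double and best tile-sum, each with its player) and picks the double winner if any, else the sum winner.
import Mathlib
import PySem

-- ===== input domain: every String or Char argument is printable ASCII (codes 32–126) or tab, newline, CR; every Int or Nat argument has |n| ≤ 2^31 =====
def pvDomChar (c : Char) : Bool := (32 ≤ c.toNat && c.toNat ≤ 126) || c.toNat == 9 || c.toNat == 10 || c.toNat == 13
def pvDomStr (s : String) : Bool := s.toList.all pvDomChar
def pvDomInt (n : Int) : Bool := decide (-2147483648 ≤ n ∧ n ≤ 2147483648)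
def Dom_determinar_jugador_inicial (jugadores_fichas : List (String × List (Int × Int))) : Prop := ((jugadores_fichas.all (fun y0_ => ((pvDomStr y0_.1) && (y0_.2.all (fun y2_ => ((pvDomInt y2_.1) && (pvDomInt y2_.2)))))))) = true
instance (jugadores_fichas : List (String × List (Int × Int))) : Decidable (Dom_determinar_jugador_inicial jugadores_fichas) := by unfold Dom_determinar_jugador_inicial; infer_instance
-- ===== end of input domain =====

-- B merges A's two conditional scans into one pass with two accumulators; return value equivalence proved.
-- ===== PORT A =====
def pvStepD (jug : String) (st : Int × Option String) (f : Int × Int) : Int × Option String :=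
  if f.1 = f.2 ∧ f.1 > st.1 then (f.1, some jug) else st

def pvStepS (jug : String) (st : Int × Option String) (f : Int × Int) : Int × Option String :=
  if f.1 + f.2 > st.1 then (f.1 + f.2, some jug) else st

def pvLoopD (st : Int × Option String) (xs : List (String × List (Int × Int))) : Int × Option String :=
  xs.foldl (fun st p => p.2.foldl (pvStepD p.1) st) st

def pvLoopS (st : Int × Option String) (xs : List (String × List (Int × Int))) : Int × Option String :=
  xs.foldl (fun st p => p.2.foldl (pvStepS p.1) st) st

def determinar_jugador_inicial (jugadores_fichas : List (String × List (Int × Int))) : Option String :=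
  let st := pvLoopD (-1, none) jugadores_fichas
  match st.2 with
  | none => (pvLoopS st jugadores_fichas).2
  | some j => some j

-- ===== PORT B =====
def pvStepB (jug : String) (st : (Int × Option String) × (Int × Option String)) (f : Int × Int) :
    (Int × Option String) × (Int × Option String) :=
  let st1 := if f.1 = f.2 ∧ f.1 > st.1.1 then (f.1, some jug) else st.1
  let s := f.1 + f.2
  let st2 := if s > st.2.1 then (s, some jug) else st.2
  (st1, st2)

def pvLoopB (st : (Int × Option String) × (Int × Option String))
    (xs : List (String × List (Int × Int))) : (Int × Option String) × (Int × Option String) :=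
  xs.foldl (fun st p => p.2.foldl (pvStepB p.1) st) st

def determinar_jugador_inicial_alt (jugadores_fichas : List (String × List (Int × Int))) : Option String :=
  let st := pvLoopB ((-1, none), (-1, none)) jugadores_fichas
  match st.1.2 with
  | some j => some j
  | none => st.2.2

-- ===== PRECONDITION & SPEC =====
def Spec_determinar_jugador_inicial (jugadores_fichas : List (String × List (Int × Int))) (out : Option String) : Prop := out = determinar_jugador_inicial_alt jugadores_fichas
instance (jugadores_fichas : List (String × List (Int × Int))) (out : Option String) : Decidable (Spec_determinar_jugador_inicial jugadores_fichas out) := by unfold Spec_determinar_jugador_inicial; infer_instance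

-- ===== CLAIM (what is proved, stated in full; the proofs are below) =====
def Claim_equal_determinar_jugador_inicial : Prop := ∀ (jugadores_fichas : List (String × List (Int × Int))), Dom_determinar_jugador_inicial jugadores_fichas → Spec_determinar_jugador_inicial jugadores_fichas (determinar_jugador_inicial jugadores_fichas)

-- ===== LEMMAS AND PROOFS =====

-- B's combined fold is the pair of A's two folds
theorem pvFoldB_eq (jug : String) (fs : List (Int × Int)) (d s : Int × Option String) :
    fs.foldl (pvStepB jug) (d, s) =
      (fs.foldl (pvStepD jug) d, fs.foldl (pvStepS jug) s) := by
  induction fs generalizing d s with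
  | nil => rfl
  | cons f ft ih =>
    simp only [List.foldl, pvStepB, pvStepD, pvStepS]
    split_ifs <;> exact ih _ _

theorem pvLoopB_eq (xs : List (String × List (Int × Int))) (d s : Int × Option String) :
    pvLoopB (d, s) xs = (pvLoopD d xs, pvLoopS s xs) := by
  induction xs generalizing d s with
  | nil => rfl
  | cons p rest ih =>
    simp only [pvLoopB, pvLoopD, pvLoopS, List.foldl]
    rw [pvFoldB_eq]
    exact ih _ _

-- once a player is recorded, the inner double-fold keeps some player recorded
theorem pvFoldD_some (jug : String) (fs : List (Int × Int)) (c : Int) (j : String) :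
    ∃ c' j', fs.foldl (pvStepD jug) (c, some j) = (c', some j') := by
  induction fs generalizing c j with
  | nil => exact ⟨c, j, rfl⟩
  | cons f ft ih =>
    simp only [List.foldl, pvStepD]
    split_ifs
    · exact ih _ _
    · exact ih _ _

theorem pvLoopD_some (xs : List (String × List (Int × Int))) (c : Int) (j : String) :
    ∃ c' j', pvLoopD (c, some j) xs = (c', some j') := by
  induction xs generalizing c j with
  | nil => exact ⟨c, j, rfl⟩
  | cons p rest ih =>
    simp only [pvLoopD, List.foldl]
    obtain ⟨c', j', h⟩ := pvFoldD_some p.1 p.2 c j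
    rw [h]
    exact ih c' j'

-- the inner double-fold either leaves the state unchanged or records a player
theorem pvFoldD_cases (jug : String) (fs : List (Int × Int)) (st : Int × Option String) :
    fs.foldl (pvStepD jug) st = st ∨ ∃ c j, fs.foldl (pvStepD jug) st = (c, some j) := by
  induction fs generalizing st with
  | nil => exact Or.inl rfl
  | cons f ft ih =>
    simp only [List.foldl, pvStepD]
    split_ifs with hc
    · exact Or.inr (pvFoldD_some jug ft f.1 jug)
    · exact ih st

theorem pvLoopD_cases (xs : List (String × List (Int × Int))) (st : Int × Option String) :
    pvLoopD st xs = st ∨ ∃ c j, pvLoopD st xs = (c, some j) := by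
  induction xs generalizing st with
  | nil => exact Or.inl rfl
  | cons p rest ih =>
    simp only [pvLoopD, List.foldl]
    rcases pvFoldD_cases p.1 p.2 st with h | ⟨c, j, h⟩
    · rw [h]; exact ih st
    · rw [h]
      obtain ⟨c', j', h'⟩ := pvLoopD_some rest c j
      exact Or.inr ⟨c', j', h'⟩

-- the double scan never updates when it ends with no player found
theorem pvLoopD_none (xs : List (String × List (Int × Int))) (st : Int × Option String)
    (h : (pvLoopD st xs).2 = none) : pvLoopD st xs = st := by
  rcases pvLoopD_cases xs st with h' | ⟨c, j, h'⟩
  · exact h'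
  · rw [h'] at h; cases h

-- ===== VERDICT (by name: the statement is the Claim_ definition above) =====
theorem determinar_jugador_inicial_spec : Claim_equal_determinar_jugador_inicial := by
  intro xs _
  unfold Spec_determinar_jugador_inicial determinar_jugador_inicial determinar_jugador_inicial_alt
  rw [pvLoopB_eq]
  cases hD : (pvLoopD (-1, none) xs).2 with
  | none =>
    simp only [hD]
    rw [pvLoopD_none xs (-1, none) hD]
  | some j => simp only [hD]
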